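-- pv_equiv track=rewrite | github.com/devyeony/algorithm-study | 00_others/Sawyer/9095_plus.py | dp
-- ===== SOURCE A (Python) =====
-- def dp(n : int ) :
--     if n == 1 :
--         return 1
--     elif n == 2 :
--         return 2
--     elif n == 3 :
--         return 4
--     else :
--         return dp(n-1) + dp(n-2) + dp(n-3)
-- ===== SOURCE B (Python) =====
-- def dp(n: int):
--     # iterative bottom-up DP: O(n) instead of O(3^n) recursion.
--     # f(0)=1, f(-1)=f(-2)=0, f(k)=f(k-1)+f(k-2)+f(k-3); answer is f(n).
--     if n < 1:
--         raise ValueError("n must be a positive integer")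
--     a, b, c = 0, 0, 1
--     for _ in range(n):
--         a, b, c = b, c, a + b + c
--     return c
-- ===== Notes on version B (the rewrite author's own statement) =====
-- stated objective: faster
-- what changed: Replaced the ternary-branching recursion with an iterative bottom-up DP keeping only a rolling triple of the last three values; intended as asymptotically faster (O(n) vs O(3^n)); measured 2245x at the largest size both finished (n=16), beyond which A times out, so a timing run could not confirm it.
-- outside the precondition, e.g. on dp(0): A raises RecursionError, B raises ValueError
import Mathlib
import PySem

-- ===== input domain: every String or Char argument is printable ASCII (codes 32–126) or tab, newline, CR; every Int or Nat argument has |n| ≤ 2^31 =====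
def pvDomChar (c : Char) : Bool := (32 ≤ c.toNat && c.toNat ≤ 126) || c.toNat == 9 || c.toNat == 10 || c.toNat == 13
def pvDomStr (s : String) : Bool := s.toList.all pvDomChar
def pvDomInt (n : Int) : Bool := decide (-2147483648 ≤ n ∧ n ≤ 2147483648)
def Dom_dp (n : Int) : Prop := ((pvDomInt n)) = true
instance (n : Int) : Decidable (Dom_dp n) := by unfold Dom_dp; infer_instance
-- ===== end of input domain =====

-- B replaces A's ternary recursion with an iterative DP over a rolling triple; intended as faster (measured 2245x at n=16, the largest size both finished; A times out beyond).


-- ===== PORT A =====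
-- A's recursion on n, mirrored as structural recursion on n.toNat; for n ≤ 0 the
-- Python recursion never terminates (excluded by Pre_dp), here it yields 0.
def dpNat : Nat → Int
  | 0 => 0
  | 1 => 1
  | 2 => 2
  | 3 => 4
  | (m + 4) => dpNat (m + 3) + dpNat (m + 2) + dpNat (m + 1)

def dp (n : Int) : Int := dpNat n.toNat

-- ===== PORT B =====
-- B raises ValueError for n < 1 (outside Pre_dp); the port yields 0 there.
def dp_alt (n : Int) : Int :=
  if n < 1 then 0
  else
    let t := (List.range n.toNat).foldl
      (fun (s : Int × Int × Int) _ => (s.2.1, s.2.2, s.1 + s.2.1 + s.2.2)) (0, 0, 1)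
    t.2.2

-- ===== PRECONDITION & SPEC =====
-- For n ≤ 0 the Python A recurses without bound (RecursionError): excluded.
def Pre_dp (n : Int) : Prop := 1 ≤ n
instance (n : Int) : Decidable (Pre_dp n) := by unfold Pre_dp; infer_instance
def pvWitness_dp : Int := 5

def Spec_dp (n : Int) (out : Int) : Prop := out = dp_alt n
instance (n : Int) (out : Int) : Decidable (Spec_dp n out) := by unfold Spec_dp; infer_instance

-- ===== CLAIM (what is proved, stated in full; the proofs are below) =====
def Claim_equal_dp : Prop := ∀ (n : Int), Dom_dp n → Pre_dp n → Spec_dp n (dp n)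

-- ===== LEMMAS AND PROOFS =====

-- the sequence B's rolling triple tracks: g (k+2) = f k with f(0)=1, f(-1)=f(-2)=0
def gSeq : Nat → Int
  | 0 => 0
  | 1 => 0
  | 2 => 1
  | (k + 3) => gSeq k + gSeq (k + 1) + gSeq (k + 2)

-- loop invariant: after k steps the triple is (g k, g (k+1), g (k+2))
theorem dp_loop_inv (k : Nat) :
    (List.range k).foldl
      (fun (s : Int × Int × Int) _ => (s.2.1, s.2.2, s.1 + s.2.1 + s.2.2)) (0, 0, 1)
      = (gSeq k, gSeq (k + 1), gSeq (k + 2)) := by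
  induction k with
  | zero => simp [gSeq]
  | succ k ih =>
    rw [List.range_succ, List.foldl_append, ih]
    show (gSeq (k + 1), gSeq (k + 2), gSeq k + gSeq (k + 1) + gSeq (k + 2)) = _
    rw [show gSeq (k + 3) = gSeq k + gSeq (k + 1) + gSeq (k + 2) from rfl]

-- B's sequence agrees with A's recursion from index 1 on
theorem gSeq_eq_dpNat : ∀ m : Nat, gSeq (m + 3) = dpNat (m + 1)
  | 0 => rfl
  | 1 => rfl
  | 2 => rfl
  | (m + 3) => by
    rw [show m + 3 + 3 = (m + 3) + 3 from rfl,
        show gSeq ((m + 3) + 3) = gSeq (m + 3) + gSeq (m + 4) + gSeq (m + 5) from rfl,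
        gSeq_eq_dpNat m, gSeq_eq_dpNat (m + 1), gSeq_eq_dpNat (m + 2)]
    rw [show dpNat (m + 3 + 1) = dpNat (m + 3) + dpNat (m + 2) + dpNat (m + 1) from rfl]
    ring

-- ===== VERDICT (by name: the statement is the Claim_ definition above) =====
theorem dp_spec : Claim_equal_dp := by
  intro n _ hpre
  unfold Spec_dp dp dp_alt
  have hn : ¬ (n < 1) := by unfold Pre_dp at hpre; omega
  simp only [hn, if_false]
  have hm : ∃ m : Nat, n.toNat = m + 1 := ⟨n.toNat - 1, by omega⟩
  obtain ⟨m, hm⟩ := hm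
  rw [hm, dp_loop_inv]
  exact (gSeq_eq_dpNat m).symm
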